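-- pv_equiv track=rewrite | github.com/Hiroki-Seto/codility-lessons | frogriverone/main.py | solurion
-- ===== SOURCE A (Python) =====
-- def solurion(X, A):
--
--     N = len(A)
--
--     data = set([i for i in range(1, X+1)])
--     for i, v in enumerate(A):
--         data.discard(v)
--         if not data:
--             return i
--
--     return -1
-- ===== SOURCE B (Python) =====
-- def solurion(X, A):
--     if not A:
--         return -1  # no hop ever happens, so there is no time at all
--     first = {}
--     for i, v in enumerate(A):
--         if v not in first:
--             first[v] = i
--     ans = 0  # earliest possible moment
--     for v in range(1, X + 1):
--         if v not in first:
--             return -1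
--         ans = max(ans, first[v])
--     return ans
-- ===== Notes on version B (the rewrite author's own statement) =====
-- stated objective: alternative
-- what changed: B replaces A's single scan with a shrinking required-set and in-loop emptiness test by two independent phases: one pass recording the first-occurrence index of every value, then a pass over the required range 1..X taking the maximum first-occurrence index (missing value -> -1).
import Mathlib
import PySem

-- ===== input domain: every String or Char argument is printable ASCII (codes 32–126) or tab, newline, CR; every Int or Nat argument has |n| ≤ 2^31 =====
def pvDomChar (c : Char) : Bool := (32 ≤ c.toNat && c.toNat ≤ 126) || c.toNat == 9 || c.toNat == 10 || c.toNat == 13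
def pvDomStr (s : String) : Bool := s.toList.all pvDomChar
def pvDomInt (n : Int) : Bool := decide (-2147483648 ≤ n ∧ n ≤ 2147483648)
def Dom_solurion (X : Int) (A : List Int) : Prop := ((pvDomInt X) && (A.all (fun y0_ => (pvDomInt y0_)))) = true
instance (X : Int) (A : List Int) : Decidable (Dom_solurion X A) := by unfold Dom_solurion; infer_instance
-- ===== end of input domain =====

-- B replaces A's shrinking-set single scan by two independent phases: a first-occurrence map of all
-- values, then a scan of the required range 1..X taking the maximum first-occurrence index
-- (alternative decomposition, not claimed faster).


-- ===== PORT A =====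
-- the 'for i, v in enumerate(A): data.discard(v); if not data: return i' loop
def solurionLoop (data : PySem.Set Int) : List (Int × Int) → Int
  | [] => -1
  | (i, v) :: rest =>
    let d := PySem.Set.discard data v
    if d = [] then i else solurionLoop d rest

def solurion (X : Int) (A : List Int) : Int :=
  let _N : Int := A.length
  -- set() of the duplicate-free range comprehension: its distinct elements are the comprehension
  -- itself (exact: PySem.Set.ofList is the identity on a Nodup list, PySem.Set.ofList_eq_self_of_nodup)
  let data : PySem.Set Int := (PySem.List.pyRange 1 (X + 1) 1).map (fun i => i)
  solurionLoop data (PySem.List.enumerate A 0)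

-- ===== PORT B =====
-- the 'for v in range(1, X+1): if v not in first: return -1; ans = max(ans, first[v])' loop
-- ('first[v]' is read as getD v 0; the branch guarantees the key is present)
def solurionAltLoop (first : PySem.Dict Int Int) : List Int → Int → Int
  | [], ans => ans
  | v :: t, ans =>
    if first.contains v = false then -1
    else solurionAltLoop first t (max ans (first.getD v 0))

def solurion_alt (X : Int) (A : List Int) : Int :=
  if A = [] then -1
  else
    let first : PySem.Dict Int Int :=
      (PySem.List.enumerate A 0).foldl
        (fun f p => if f.contains p.2 = false then f.insert p.2 p.1 else f)
        PySem.Dict.empty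
    solurionAltLoop first (PySem.List.pyRange 1 (X + 1) 1) 0

-- ===== PRECONDITION & SPEC =====
def Spec_solurion (X : Int) (A : List Int) (out : Int) : Prop := out = solurion_alt X A
instance (X : Int) (A : List Int) (out : Int) : Decidable (Spec_solurion X A out) := by unfold Spec_solurion; infer_instance

-- ===== CLAIM =====
def Claim_equal_solurion : Prop := ∀ (X : Int) (A : List Int), Dom_solurion X A → Spec_solurion X A (solurion X A)

-- ===== LEMMAS AND PROOFS =====

-- the index (relative to the remaining suffix) at which A's shrinking set first becomes empty
def coverIdx (s : List Int) : List Int → Option Nat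
  | [] => none
  | v :: t' =>
    let s' := PySem.Set.discard s v
    if s' = [] then some 0 else (coverIdx s' t').map (· + 1)

-- maximum over s of the first-occurrence index in t
def maxFi (s t : List Int) : Nat := (s.map (fun v => t.idxOf v)).foldr max 0

theorem foldr_max_le {l : List Nat} {n : Nat} (h : ∀ x ∈ l, x ≤ n) : l.foldr max 0 ≤ n := by
  induction l with
  | nil => exact Nat.zero_le n
  | cons x xs ih =>
    simp only [List.foldr_cons]
    exact max_le (h x (by simp)) (ih (fun y hy => h y (by simp [hy])))

theorem le_foldr_max {l : List Nat} {x : Nat} (h : x ∈ l) : x ≤ l.foldr max 0 := by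
  induction l with
  | nil => simp at h
  | cons y ys ih =>
    simp only [List.foldr_cons]
    rcases List.mem_cons.mp h with rfl | h'
    · exact le_max_left _ _
    · exact le_trans (ih h') (le_max_right _ _)

theorem foldr_max_mem {l : List Nat} (h : l ≠ []) : l.foldr max 0 ∈ l := by
  induction l with
  | nil => exact absurd rfl h
  | cons x xs ih =>
    by_cases hxs : xs = []
    · subst hxs; simp
    · rw [List.foldr_cons]
      rcases max_choice x (xs.foldr max 0) with hm | hm
      · rw [hm]; exact List.mem_cons_self
      · rw [hm]; exact List.mem_cons_of_mem _ (ih hxs)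

theorem solurionLoop_char (t : List Int) : ∀ (s : List Int) (i0 : Int),
    solurionLoop s (PySem.List.enumerate t i0) =
      match coverIdx s t with
      | some k => i0 + (k : Int)
      | none => -1 := by
  induction t with
  | nil => intro s i0; simp [PySem.List.enumerate_nil, solurionLoop, coverIdx]
  | cons v t' ih =>
    intro s i0
    rw [PySem.List.enumerate_cons]
    simp only [solurionLoop, coverIdx]
    by_cases h : PySem.Set.discard s v = []
    · simp [h]
    · simp only [h, if_false, ih]
      cases hc : coverIdx (PySem.Set.discard s v) t' with
      | none => simp
      | some k => simp [Option.map_some]; ring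

theorem coverIdx_char (t : List Int) : ∀ (s : List Int),
    coverIdx s t = if (∀ u ∈ s, u ∈ t) ∧ t ≠ [] then some (maxFi s t) else none := by
  induction t with
  | nil => intro s; simp [coverIdx]
  | cons v t' ih =>
    intro s
    have hmem : ∀ u, u ∈ PySem.Set.discard s v ↔ (u ∈ s ∧ u ≠ v) :=
      fun u => PySem.Set.mem_discard s v u
    by_cases hs' : PySem.Set.discard s v = []
    · have hL : coverIdx s (v :: t') = some 0 := by simp [coverIdx, hs']
      have hall : ∀ u ∈ s, u = v := by
        intro u hu
        by_contra hne
        exact (List.eq_nil_iff_forall_not_mem.mp hs' u) ((hmem u).mpr ⟨hu, hne⟩)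
      have hcond : (∀ u ∈ s, u ∈ v :: t') ∧ v :: t' ≠ [] := by
        refine ⟨fun u hu => ?_, by simp⟩
        rw [hall u hu]; exact List.mem_cons_self
      rw [hL, if_pos hcond]
      congr 1
      symm
      apply Nat.le_antisymm _ (Nat.zero_le _)
      apply foldr_max_le
      intro x hx
      rcases List.mem_map.mp hx with ⟨u, hu, rfl⟩
      rw [hall u hu]
      simp [List.idxOf_cons_self]
    · have hL : coverIdx s (v :: t') = (coverIdx (PySem.Set.discard s v) t').map (· + 1) := by
        simp [coverIdx, hs']
      rw [hL, ih]
      by_cases hc : (∀ u ∈ PySem.Set.discard s v, u ∈ t') ∧ t' ≠ []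
      · have hcond : (∀ u ∈ s, u ∈ v :: t') ∧ v :: t' ≠ [] := by
          refine ⟨fun u hu => ?_, by simp⟩
          by_cases huv : u = v
          · rw [huv]; exact List.mem_cons_self
          · exact List.mem_cons_of_mem _ (hc.1 u ((hmem u).mpr ⟨hu, huv⟩))
        rw [if_pos hc, if_pos hcond, Option.map_some]
        congr 1
        apply Nat.le_antisymm
        · have hne : (PySem.Set.discard s v).map (fun u => t'.idxOf u) ≠ [] := by
            simp [List.map_eq_nil_iff, hs']
          have hmm := foldr_max_mem hne
          rcases List.mem_map.mp hmm with ⟨u₀, hu₀, hval⟩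
          have hu₀s : u₀ ∈ s := ((hmem u₀).mp hu₀).1
          have hu₀v : u₀ ≠ v := ((hmem u₀).mp hu₀).2
          have hstep : (v :: t').idxOf u₀ = t'.idxOf u₀ + 1 := by
            rw [List.idxOf_cons_ne _ (Ne.symm hu₀v)]
          calc maxFi (PySem.Set.discard s v) t' + 1
              = t'.idxOf u₀ + 1 := by simp only [maxFi]; rw [← hval]
            _ = (v :: t').idxOf u₀ := hstep.symm
            _ ≤ maxFi s (v :: t') := le_foldr_max (List.mem_map.mpr ⟨u₀, hu₀s, rfl⟩)
        · apply foldr_max_le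
          intro x hx
          rcases List.mem_map.mp hx with ⟨u, hu, rfl⟩
          by_cases huv : u = v
          · rw [huv, List.idxOf_cons_self]; exact Nat.zero_le _
          · rw [List.idxOf_cons_ne _ (Ne.symm huv)]
            have hud : u ∈ PySem.Set.discard s v := (hmem u).mpr ⟨hu, huv⟩
            have hle : t'.idxOf u ≤ maxFi (PySem.Set.discard s v) t' :=
              le_foldr_max (List.mem_map.mpr ⟨u, hud, rfl⟩)
            omega
      · have hcond : ¬ ((∀ u ∈ s, u ∈ v :: t') ∧ v :: t' ≠ []) := by
          rintro ⟨hsub, -⟩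
          apply hc
          constructor
          · intro u hu
            have h1 := (hmem u).mp hu
            rcases List.mem_cons.mp (hsub u h1.1) with h2 | h2
            · exact absurd h2 h1.2
            · exact h2
          · rintro rfl
            obtain ⟨w, hw⟩ := List.exists_mem_of_ne_nil _ hs'
            have h1 := (hmem w).mp hw
            rcases List.mem_cons.mp (hsub w h1.1) with h2 | h2
            · exact h1.2 h2
            · simp at h2
        rw [if_neg hc, if_neg hcond, Option.map_none]

-- the required values 1..X
def reqL (X : Int) : List Int := PySem.List.pyRange 1 (X + 1) 1

theorem solurion_char (X : Int) (A : List Int) :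
    solurion X A =
      if (∀ u ∈ reqL X, u ∈ A) ∧ A ≠ [] then ((maxFi (reqL X) A : Nat) : Int) else -1 := by
  show solurionLoop ((PySem.List.pyRange 1 (X + 1) 1).map (fun i => i))
      (PySem.List.enumerate A 0) = _
  have hid : (PySem.List.pyRange 1 (X + 1) 1).map (fun i => i) = reqL X := by
    simp [reqL]
  rw [hid, solurionLoop_char, coverIdx_char]
  by_cases h : (∀ u ∈ reqL X, u ∈ A) ∧ A ≠ []
  · rw [if_pos h, if_pos h]; simp
  · rw [if_neg h, if_neg h]

-- B's first loop builds the first-occurrence map: its lookups characterised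
theorem buildFirst_get? (t : List Int) : ∀ (i0 : Int) (d : PySem.Dict Int Int) (u : Int),
    ((PySem.List.enumerate t i0).foldl
      (fun f p => if f.contains p.2 = false then f.insert p.2 p.1 else f) d).get? u =
      match d.get? u with
      | some j => some j
      | none => if u ∈ t then some (i0 + (t.idxOf u : Int)) else none := by
  induction t with
  | nil => intro i0 d u; cases h : d.get? u <;> simp [PySem.List.enumerate_nil, h]
  | cons v t' ih =>
    intro i0 d u
    rw [PySem.List.enumerate_cons]
    simp only [List.foldl_cons]
    rw [ih]
    cases hdu : d.get? u with
    | some j =>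
      have : (if d.contains v = false then d.insert v i0 else d).get? u = some j := by
        by_cases hc : d.contains v = false
        · rw [if_pos hc]
          by_cases huv : u = v
          · subst huv
            rw [PySem.Dict.contains_eq_isSome_get?, hdu] at hc
            simp at hc
          · rw [PySem.Dict.get?_insert, if_neg huv, hdu]
        · rw [if_neg hc, hdu]
      rw [this]
    | none =>
      by_cases huv : u = v
      · subst huv
        have hc : d.contains u = false := by
          rw [PySem.Dict.contains_eq_isSome_get?, hdu]; rfl
        rw [if_pos hc, PySem.Dict.get?_insert_self]
        simp [List.idxOf_cons_self]
      · have : (if d.contains v = false then d.insert v i0 else d).get? u = none := by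
          by_cases hc : d.contains v = false
          · rw [if_pos hc, PySem.Dict.get?_insert, if_neg huv, hdu]
          · rw [if_neg hc, hdu]
        rw [this]
        have hmem : (u ∈ v :: t') ↔ (u ∈ t') := by simp [List.mem_cons, huv]
        by_cases hut : u ∈ t'
        · rw [if_pos hut, if_pos (hmem.mpr hut)]
          rw [List.idxOf_cons_ne _ (Ne.symm huv)]
          simp only [Option.some.injEq]
          push_cast
          ring
        · rw [if_neg hut, if_neg (fun h => hut (hmem.mp h))]

-- B's second loop characterised
theorem solurionAltLoop_char (first : PySem.Dict Int Int) (l : List Int) : ∀ (ans : Int),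
    solurionAltLoop first l ans =
      if ∀ v ∈ l, first.contains v = true then
        l.foldl (fun acc v => max acc (first.getD v 0)) ans
      else -1 := by
  induction l with
  | nil => intro ans; simp [solurionAltLoop]
  | cons v t ih =>
    intro ans
    simp only [solurionAltLoop, List.foldl_cons]
    by_cases hc : first.contains v = false
    · rw [if_pos hc, if_neg]
      rintro hall
      rw [hall v List.mem_cons_self] at hc
      cases hc
    · rw [if_neg hc, ih]
      have hcv : first.contains v = true := by
        cases h : first.contains v
        · exact absurd h hc
        · rfl
      by_cases hall : ∀ u ∈ t, first.contains u = true
      · rw [if_pos hall, if_pos]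
        intro u hu
        rcases List.mem_cons.mp hu with rfl | hu'
        · exact hcv
        · exact hall u hu'
      · rw [if_neg hall, if_neg]
        intro h
        exact hall (fun u hu => h u (List.mem_cons_of_mem _ hu))

-- folding max over first-occurrence indices (from -1) is maxFi, for a nonempty required list
theorem foldl_max_idx (A : List Int) (l : List Int) (h : l ≠ []) : ∀ (ans : Int),
    l.foldl (fun acc v => max acc ((A.idxOf v : Nat) : Int)) ans =
      max ans ((maxFi l A : Nat) : Int) := by
  induction l with
  | nil => exact absurd rfl h
  | cons v t ih =>
    intro ans
    simp only [List.foldl_cons]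
    by_cases ht : t = []
    · subst ht
      simp only [List.foldl_nil, maxFi, List.map_cons, List.map_nil, List.foldr_cons,
        List.foldr_nil, Nat.max_zero]
    · rw [ih ht]
      simp only [maxFi, List.map_cons, List.foldr_cons]
      rw [Nat.cast_max, max_assoc]

theorem solurion_alt_char (X : Int) (A : List Int) :
    solurion_alt X A =
      if (∀ u ∈ reqL X, u ∈ A) ∧ A ≠ [] then ((maxFi (reqL X) A : Nat) : Int) else -1 := by
  by_cases hA : A = []
  · rw [solurion_alt, if_pos hA, if_neg]
    rintro ⟨-, h⟩; exact h hA
  · rw [solurion_alt, if_neg hA]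
    set first := (PySem.List.enumerate A 0).foldl
        (fun f p => if f.contains p.2 = false then f.insert p.2 p.1 else f)
        (PySem.Dict.empty : PySem.Dict Int Int) with hfirst
    have hget : ∀ u, first.get? u = if u ∈ A then some ((A.idxOf u : Nat) : Int) else none := by
      intro u
      rw [hfirst, buildFirst_get? A 0 PySem.Dict.empty u, PySem.Dict.get?_empty]
      by_cases hu : u ∈ A
      · rw [if_pos hu, if_pos hu]
        norm_num
      · rw [if_neg hu, if_neg hu]
    have hcont : ∀ u, first.contains u = true ↔ u ∈ A := by
      intro u
      rw [PySem.Dict.contains_eq_isSome_get?, hget u]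
      by_cases hu : u ∈ A <;> simp [hu, Option.isSome]
    have hreq : (PySem.List.pyRange 1 (X + 1) 1) = reqL X := rfl
    rw [hreq, solurionAltLoop_char]
    by_cases hall : ∀ v ∈ reqL X, first.contains v = true
    · rw [if_pos hall]
      have hmem : ∀ u ∈ reqL X, u ∈ A := fun u hu => (hcont u).mp (hall u hu)
      rw [if_pos ⟨hmem, hA⟩]
      have hstep : (reqL X).foldl (fun acc v => max acc (first.getD v 0)) 0 =
          (reqL X).foldl (fun acc v => max acc ((A.idxOf v : Nat) : Int)) 0 := by
        have : ∀ (t : List Int), (∀ u ∈ t, u ∈ A) → ∀ ans : Int,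
            t.foldl (fun acc v => max acc (first.getD v 0)) ans =
            t.foldl (fun acc v => max acc ((A.idxOf v : Nat) : Int)) ans := by
          intro t
          induction t with
          | nil => intro _ ans; rfl
          | cons v t' ih =>
            intro hmem' ans
            simp only [List.foldl_cons]
            have hv : first.getD v 0 = ((A.idxOf v : Nat) : Int) := by
              rw [PySem.Dict.getD_eq_get?_getD, hget v, if_pos (hmem' v List.mem_cons_self)]
              rfl
            rw [hv, ih (fun u hu => hmem' u (List.mem_cons_of_mem _ hu))]
        exact this _ hmem _
      rw [hstep]
      by_cases hne : reqL X = []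
      · rw [hne]
        simp [maxFi]
      · rw [foldl_max_idx A _ hne]
        exact max_eq_right (Int.natCast_nonneg _)
    · rw [if_neg hall, if_neg]
      rintro ⟨hmem, -⟩
      exact hall (fun v hv => (hcont v).mpr (hmem v hv))

-- ===== VERDICT =====
theorem solurion_spec : Claim_equal_solurion := by
  intro X A _
  unfold Spec_solurion
  rw [solurion_char, solurion_alt_char]
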